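-- pv_equiv track=rewrite | github.com/streetartist/scrawl | scrawl_ide/panels/code_editor/editor_widget.py | _get_line_indent
-- ===== SOURCE A (Python) =====
-- def _get_line_indent(line: str) -> str:
--     """Get the indentation of a line."""
--     indent = ""
--     for char in line:
--         if char in ' \t':
--             indent += char
--         else:
--             break
--     return indent
-- ===== SOURCE B (Python) =====
-- def _get_line_indent(line: str) -> str:
--     """Get the indentation of a line."""
--     stripped = line.lstrip(' \t')
--     return line[:len(line) - len(stripped)]
-- ===== Notes on version B (the rewrite author's own statement) =====
-- stated objective: simpler
-- what changed: Replaces the character-accumulating loop with a left-strip of spaces/tabs followed by a prefix slice whose length is the difference of the original and stripped lengths; no loop, branch or buffer.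
import Mathlib
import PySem

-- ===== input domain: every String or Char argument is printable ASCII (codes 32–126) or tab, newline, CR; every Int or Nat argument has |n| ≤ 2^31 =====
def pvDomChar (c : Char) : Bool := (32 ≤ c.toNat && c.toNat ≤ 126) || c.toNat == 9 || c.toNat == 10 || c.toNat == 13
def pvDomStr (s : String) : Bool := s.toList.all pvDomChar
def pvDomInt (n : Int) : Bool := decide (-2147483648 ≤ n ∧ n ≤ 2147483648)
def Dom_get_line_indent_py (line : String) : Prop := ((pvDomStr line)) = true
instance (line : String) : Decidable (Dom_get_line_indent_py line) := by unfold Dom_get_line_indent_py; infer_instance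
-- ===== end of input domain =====

-- B replaces A's accumulating loop with lstrip(' \t') plus a length-difference prefix slice (objective: simpler).

-- ===== PORT A =====
-- the for-loop with break: keep the char if it is ' ' or '\t', stop at the first other char
def indentLoop : List Char → List Char
  | [] => []
  | c :: rest => if c = ' ' ∨ c = '\t' then c :: indentLoop rest else []

def get_line_indent_py (line : String) : String :=
  String.ofList (indentLoop line.toList)

-- ===== PORT B =====
-- line.lstrip(' \t') ported by hand as dropWhile over the code points (exact: lstrip with an
-- explicit chars argument drops exactly the leading chars from that set); then line[:len-len(stripped)]
def get_line_indent_py_alt (line : String) : String :=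
  let stripped := line.toList.dropWhile (fun c => decide (c = ' ' ∨ c = '\t'))
  String.ofList (PySem.List.slice line.toList none
    (some ((line.toList.length - stripped.length : Nat) : Int)))

-- ===== PRECONDITION & SPEC =====
def Spec_get_line_indent_py (line : String) (out : String) : Prop := out = get_line_indent_py_alt line
instance (line : String) (out : String) : Decidable (Spec_get_line_indent_py line out) := by unfold Spec_get_line_indent_py; infer_instance

-- ===== CLAIM (what is proved, stated in full; the proofs are below) =====
def Claim_equal_get_line_indent_py : Prop := ∀ (line : String), Dom_get_line_indent_py line → Spec_get_line_indent_py line (get_line_indent_py line)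

-- ===== LEMMAS AND PROOFS =====
theorem indentLoop_eq_take (xs : List Char) :
    indentLoop xs =
      xs.take (xs.length - (xs.dropWhile (fun c => decide (c = ' ' ∨ c = '\t'))).length) := by
  induction xs with
  | nil => rfl
  | cons c rest ih =>
    by_cases h : c = ' ' ∨ c = '\t'
    · have hlen : (rest.dropWhile (fun c => decide (c = ' ' ∨ c = '\t'))).length ≤ rest.length :=
        List.length_dropWhile_le _ _
      rw [indentLoop, if_pos h, List.dropWhile_cons, if_pos (by simp [h]), ih, List.length_cons,
        show rest.length + 1 - (rest.dropWhile (fun c => decide (c = ' ' ∨ c = '\t'))).length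
           = (rest.length - (rest.dropWhile (fun c => decide (c = ' ' ∨ c = '\t'))).length) + 1
           from by omega, List.take_succ_cons]
    · rw [indentLoop, if_neg h, List.dropWhile_cons, if_neg (by simp [h]), List.length_cons]
      simp

-- ===== VERDICT (by name: the statement is the Claim_ definition above) =====
theorem get_line_indent_py_spec : Claim_equal_get_line_indent_py := by
  intro line _
  show String.ofList (indentLoop line.toList) =
    String.ofList (PySem.List.slice line.toList none
      (some ((line.toList.length -
        (line.toList.dropWhile (fun c => decide (c = ' ' ∨ c = '\t'))).length : Nat) : Int)))
  rw [PySem.List.slice_to_natCast, indentLoop_eq_take]
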